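-- pv_equiv track=rewrite | github.com/matthansen0/hls-m365-seedkit | m365seed/setup.py | _match_default_users
-- ===== SOURCE A (Python) =====
-- DEFAULT_USERS = [
--     {"upn": "AllanD@{domain}", "role": "Clinical Ops Manager"},
--     {"upn": "MeganB@{domain}", "role": "Care Manager — Dr. Donald Wilson"},
--     {"upn": "NestorW@{domain}", "role": "Care Manager — Dr. Daniel Rodriguez"},
--     {"upn": "LeeG@{domain}", "role": "Nurse Manager"},
--     {"upn": "JoniS@{domain}", "role": "Compliance Officer"},
-- ]
--
-- def _match_default_users(
--     domain: str,
--     tenant_users: list[dict[str, str]],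
-- ) -> list[dict[str, str]]:
--     """Match default demo user aliases against actual tenant users.
--
--     Returns a list of dicts with 'upn', 'role', and 'matched' keys.
--     If a default user is found in the tenant, their real UPN is used.
--     """
--     # Build a lookup by alias (part before @), case-insensitive
--     alias_lookup: dict[str, str] = {}
--     for tu in tenant_users:
--         upn = tu.get("upn", "")
--         if "@" in upn:
--             alias = upn.split("@")[0].lower()
--             alias_lookup[alias] = upn
--
--     matched: list[dict[str, str]] = []
--     for default in DEFAULT_USERS:
--         template_upn = default["upn"].format(domain=domain)
--         alias = template_upn.split("@")[0].lower()
--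
--         if alias in alias_lookup:
--             matched.append({
--                 "upn": alias_lookup[alias],
--                 "role": default["role"],
--                 "matched": "true",
--             })
--         else:
--             matched.append({
--                 "upn": template_upn,
--                 "role": default["role"],
--                 "matched": "false",
--             })
--
--     return matched
-- ===== SOURCE B (Python) =====
-- DEFAULT_USERS = [
--     {"upn": "AllanD@{domain}", "role": "Clinical Ops Manager"},
--     {"upn": "MeganB@{domain}", "role": "Care Manager — Dr. Donald Wilson"},
--     {"upn": "NestorW@{domain}", "role": "Care Manager — Dr. Daniel Rodriguez"},
--     {"upn": "LeeG@{domain}", "role": "Nurse Manager"},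
--     {"upn": "JoniS@{domain}", "role": "Compliance Officer"},
-- ]
--
--
-- def _find_last_match(alias, tenant_users):
--     """Return the upn of the LAST tenant user whose '@'-bearing upn has this alias."""
--     for tu in reversed(tenant_users):
--         upn = tu.get("upn", "")
--         if "@" in upn and upn.split("@")[0].lower() == alias:
--             return upn
--     return None
--
--
-- def _row(domain, default, tenant_users):
--     template_upn = default["upn"].format(domain=domain)
--     alias = template_upn.split("@")[0].lower()
--     hit = _find_last_match(alias, tenant_users)
--     if hit is None:
--         return {"upn": template_upn, "role": default["role"], "matched": "false"}
--     return {"upn": hit, "role": default["role"], "matched": "true"}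
--
--
-- def _match_default_users(
--     domain: str,
--     tenant_users: list[dict[str, str]],
-- ) -> list[dict[str, str]]:
--     return [_row(domain, d, tenant_users) for d in DEFAULT_USERS]
-- ===== Notes on version B (the rewrite author's own statement) =====
-- stated objective: alternative
-- what changed: Replaced the precomputed alias->upn dict (last-write-wins) by a per-default reverse scan of tenant_users that returns the first (= last overall) alias match, building each output row with a comprehension.
import Mathlib
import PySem

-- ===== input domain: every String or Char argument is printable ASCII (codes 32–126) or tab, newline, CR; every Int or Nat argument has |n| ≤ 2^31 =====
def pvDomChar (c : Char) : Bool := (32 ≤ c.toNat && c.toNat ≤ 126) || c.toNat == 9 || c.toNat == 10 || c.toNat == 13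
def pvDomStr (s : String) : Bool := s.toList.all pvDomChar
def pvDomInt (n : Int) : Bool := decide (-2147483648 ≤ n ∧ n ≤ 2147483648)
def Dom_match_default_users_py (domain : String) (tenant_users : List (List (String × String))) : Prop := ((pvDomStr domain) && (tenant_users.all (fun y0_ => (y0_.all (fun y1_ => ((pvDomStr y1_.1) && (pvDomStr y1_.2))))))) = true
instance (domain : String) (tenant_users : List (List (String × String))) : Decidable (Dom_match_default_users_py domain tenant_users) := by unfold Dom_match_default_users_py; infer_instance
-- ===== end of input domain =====

-- B drops A's precomputed alias->upn dict and instead, per default user, scans tenant_users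
-- in reverse for the last alias match; same result, alternative decomposition.

-- shared module constant DEFAULT_USERS and the idioms both Pythons share verbatim
def pvDefaultUsers : List (List (String × String)) :=
  [ [("upn", "AllanD@{domain}"), ("role", "Clinical Ops Manager")],
    [("upn", "MeganB@{domain}"), ("role", "Care Manager — Dr. Donald Wilson")],
    [("upn", "NestorW@{domain}"), ("role", "Care Manager — Dr. Daniel Rodriguez")],
    [("upn", "LeeG@{domain}"), ("role", "Nurse Manager")],
    [("upn", "JoniS@{domain}"), ("role", "Compliance Officer")] ]

-- tu.get(k, "")  (first match in the assoc list, like Python's dict)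
def pvGet (tu : List (String × String)) (k : String) : String :=
  (PySem.Dict.mk tu).getD k ""

-- upn.split("@")[0].lower()  (split("@") is never empty, so [0] is its head)
def pvAliasOf (upn : String) : String :=
  PySem.Str.lower (((PySem.Str.split? upn "@").getD []).headD "")

-- default["upn"].format(domain=domain): the fixed templates contain exactly one
-- placeholder '{domain}' and no other braces, so format is exactly this replace
def pvTemplateUpn (domain : String) (default : List (String × String)) : String :=
  PySem.Str.replace (pvGet default "upn") "{domain}" domain

-- ===== PORT A =====
-- loop body of A's dict-building pass
def pvStepA (d : PySem.Dict String String) (tu : List (String × String)) : PySem.Dict String String :=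
  if PySem.Str.isIn "@" (pvGet tu "upn") then d.insert (pvAliasOf (pvGet tu "upn")) (pvGet tu "upn") else d

def match_default_users_py (domain : String) (tenant_users : List (List (String × String))) : List (List (String × String)) :=
  let aliasLookup : PySem.Dict String String := tenant_users.foldl pvStepA PySem.Dict.empty
  pvDefaultUsers.foldl (fun matched default =>
    let templateUpn := pvTemplateUpn domain default
    let al := pvAliasOf templateUpn
    if aliasLookup.contains al then
      matched ++ [[("upn", aliasLookup.getD al ""), ("role", pvGet default "role"), ("matched", "true")]]
    else
      matched ++ [[("upn", templateUpn), ("role", pvGet default "role"), ("matched", "false")]]) []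

-- ===== PORT B =====
-- _find_last_match: first match of the reversed list
def pvFindLast (al : String) (tenant_users : List (List (String × String))) : Option String :=
  (tenant_users.reverse.find? (fun tu =>
    let upn := pvGet tu "upn"
    PySem.Str.isIn "@" upn && (pvAliasOf upn == al))).map (fun tu => pvGet tu "upn")

def pvRow (domain : String) (default : List (String × String)) (tenant_users : List (List (String × String))) : List (String × String) :=
  let templateUpn := pvTemplateUpn domain default
  let al := pvAliasOf templateUpn
  match pvFindLast al tenant_users with
  | none => [("upn", templateUpn), ("role", pvGet default "role"), ("matched", "false")]
  | some hit => [("upn", hit), ("role", pvGet default "role"), ("matched", "true")]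

def match_default_users_py_alt (domain : String) (tenant_users : List (List (String × String))) : List (List (String × String)) :=
  pvDefaultUsers.map (fun d => pvRow domain d tenant_users)

-- ===== PRECONDITION & SPEC =====
def Spec_match_default_users_py (domain : String) (tenant_users : List (List (String × String))) (out : List (List (String × String))) : Prop := out = match_default_users_py_alt domain tenant_users
instance (domain : String) (tenant_users : List (List (String × String))) (out : List (List (String × String))) : Decidable (Spec_match_default_users_py domain tenant_users out) := by unfold Spec_match_default_users_py; infer_instance

-- ===== CLAIM (what is proved, stated in full; the proofs are below) =====
def Claim_equal_match_default_users_py : Prop := ∀ (domain : String) (tenant_users : List (List (String × String))), Dom_match_default_users_py domain tenant_users → Spec_match_default_users_py domain tenant_users (match_default_users_py domain tenant_users)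

-- ===== LEMMAS AND PROOFS =====

-- the dict built by A's fold looks up exactly the LAST matching tenant user
theorem lookup_eq_findLast (a : String) (l : List (List (String × String))) (d : PySem.Dict String String) :
    (l.foldl pvStepA d).get? a =
      match l.reverse.find? (fun tu =>
          PySem.Str.isIn "@" (pvGet tu "upn") && (pvAliasOf (pvGet tu "upn") == a)) with
      | some tu => some (pvGet tu "upn")
      | none => d.get? a := by
  induction l generalizing d with
  | nil => simp
  | cons t l ih =>
    rw [List.foldl_cons, ih, List.reverse_cons, List.find?_append]
    cases hf : l.reverse.find? (fun tu =>
        PySem.Str.isIn "@" (pvGet tu "upn") && (pvAliasOf (pvGet tu "upn") == a)) with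
    | some tu => rfl
    | none =>
      rw [Option.none_or]
      show (pvStepA d t).get? a = _
      rw [List.find?_cons]
      unfold pvStepA
      cases hin : PySem.Str.isIn "@" (pvGet t "upn") with
      | false =>
        simp only [Bool.false_and, Bool.false_eq_true, if_false, List.find?_nil]
      | true =>
        rw [if_pos rfl]
        simp only [Bool.true_and]
        by_cases heq : pvAliasOf (pvGet t "upn") = a
        · rw [heq]
          simp only [BEq.rfl]
          exact PySem.Dict.get?_insert_self d a (pvGet t "upn")
        · have hb : (pvAliasOf (pvGet t "upn") == a) = false := by simpa using heq
          rw [hb]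
          simp only [List.find?_nil]
          exact PySem.Dict.get?_insert_of_ne d (pvGet t "upn") (fun h => heq h.symm)

-- A's append-in-each-branch loop is a map of the branch over the list
theorem foldl_if_append_eq_map {A B : Type} (c : A → Bool) (f g : A → B) (l : List A) (acc : List B) :
    l.foldl (fun m x => if c x then m ++ [f x] else m ++ [g x]) acc
      = acc ++ l.map (fun x => if c x then f x else g x) := by
  induction l generalizing acc with
  | nil => simp
  | cons t l ih =>
    rw [List.foldl_cons, ih, List.map_cons]
    by_cases h : c t <;> simp [h]

theorem rows_agree (domain : String) (tenant_users : List (List (String × String))) (default : List (String × String)) :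
    (let aliasLookup : PySem.Dict String String := tenant_users.foldl pvStepA PySem.Dict.empty
     let templateUpn := pvTemplateUpn domain default
     let al := pvAliasOf templateUpn
     if aliasLookup.contains al then
       [("upn", aliasLookup.getD al ""), ("role", pvGet default "role"), ("matched", "true")]
     else
       [("upn", templateUpn), ("role", pvGet default "role"), ("matched", "false")])
      = pvRow domain default tenant_users := by
  simp only [pvRow, pvFindLast]
  have h := lookup_eq_findLast (pvAliasOf (pvTemplateUpn domain default)) tenant_users PySem.Dict.empty
  cases hf : tenant_users.reverse.find? (fun tu =>
      PySem.Str.isIn "@" (pvGet tu "upn") &&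
        (pvAliasOf (pvGet tu "upn") == pvAliasOf (pvTemplateUpn domain default))) with
  | some tu =>
    rw [hf] at h
    have hc : (tenant_users.foldl pvStepA PySem.Dict.empty).contains
        (pvAliasOf (pvTemplateUpn domain default)) = true := by
      rw [PySem.Dict.contains_eq_isSome_get?, h]; rfl
    simp [hc, PySem.Dict.getD_eq_get?_getD, h]
  | none =>
    rw [hf] at h
    simp only [PySem.Dict.get?_empty] at h
    have hc : (tenant_users.foldl pvStepA PySem.Dict.empty).contains
        (pvAliasOf (pvTemplateUpn domain default)) = false := by
      rw [PySem.Dict.contains_eq_isSome_get?, h]; rfl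
    simp [hc]

-- ===== VERDICT (by name: the statement is the Claim_ definition above) =====
theorem match_default_users_py_spec : Claim_equal_match_default_users_py := by
  intro domain tenant_users _
  unfold Spec_match_default_users_py match_default_users_py match_default_users_py_alt
  simp only [foldl_if_append_eq_map, List.nil_append]
  exact List.map_congr_left (fun d _ => rows_agree domain tenant_users d)
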